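-- pv_equiv track=rewrite | github.com/RasmusGuldager/Advent_of_code | 2023/7th_December/main.py | order_hands_jokers
-- ===== SOURCE A (Python) =====
-- def order_hands_jokers(hands: list) -> dict:
--     hands_dict = {
--         "high_card": [],
--         "one_pair": [],
--         "two_pair": [],
--         "three_of_a_kind": [],
--         "full_house": [],
--         "four_of_a_kind": [],
--         "five_of_a_kind": [],
--     }
--
--     rank_map = ["J", "2", "3", "4", "5", "6", "7", "8", "9", "T", "Q", "K", "A"]
--     hands_rankings = [
--         "high_card",
--         "one_pair",
--         "two_pair",
--         "three_of_a_kind",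
--         "full_house",
--         "four_of_a_kind",
--         "five_of_a_kind",
--     ]
--
--     for hand in hands:
--         if "J" in hand:
--             best_hand: str = "high_card"
--             for card in rank_map:
--                 hand_copy = hand.replace("J", card)
--                 hand_copy_type = rank_hand(hand_copy)
--                 if hands_rankings.index(hand_copy_type) > hands_rankings.index(
--                     best_hand
--                 ):
--                     best_hand = hand_copy_type
--
--         else:
--             best_hand = rank_hand(hand)
--
--         hands_dict[best_hand].append(hand)
--
--     for key in hands_dict:
--         hands_dict[key] = sorted(
--             hands_dict[key], key=lambda x: [rank_map.index(card) for card in x]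
--         )
--
--     return hands_dict
--
-- def rank_hand(hand: str) -> str:
--     hand_count = {card: hand.count(card) for card in set(hand)}
--
--     if 5 in hand_count.values():
--         return "five_of_a_kind"
--     elif 4 in hand_count.values():
--         return "four_of_a_kind"
--     elif 3 in hand_count.values() and 2 in hand_count.values():
--         return "full_house"
--     elif 3 in hand_count.values():
--         return "three_of_a_kind"
--     elif list(hand_count.values()).count(2) == 2:
--         return "two_pair"
--     elif 2 in hand_count.values():
--         return "one_pair"
--     else:
--         return "high_card"
-- ===== SOURCE B (Python) =====
-- def order_hands_jokers(hands: list) -> dict: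
--     rank_map = ["J", "2", "3", "4", "5", "6", "7", "8", "9", "T", "Q", "K", "A"]
--     categories = [
--         "high_card",
--         "one_pair",
--         "two_pair",
--         "three_of_a_kind",
--         "full_house",
--         "four_of_a_kind",
--         "five_of_a_kind",
--     ]
--
--     def type_of_counts(counts):
--         # index into categories, decided straight from the multiset of card counts
--         if 5 in counts:
--             return 6
--         if 4 in counts:
--             return 5
--         if 3 in counts and 2 in counts:
--             return 4
--         if 3 in counts:
--             return 3
--         if counts.count(2) == 2:
--             return 2
--         if 2 in counts:
--             return 1
--         return 0
--
--     def classify(hand):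
--         jokers = hand.count("J")
--         hist = {}
--         for card in hand:
--             if card != "J":
--                 hist[card] = hist.get(card, 0) + 1
--         counts = list(hist.values())
--         if jokers == 0:
--             return type_of_counts(counts)
--         # jokers either all become one fresh card, or all join one existing card
--         best = type_of_counts(counts + [jokers])
--         for joker_target in hist:
--             t = type_of_counts(
--                 [n + jokers if c == joker_target else n for c, n in hist.items()]
--             )
--             if t > best:
--                 best = t
--         return best
--
--     buckets = {name: [] for name in categories}
--     for hand in hands:
--         buckets[categories[classify(hand)]].append(hand)
--     for key in buckets:
--         buckets[key] = sorted(
--             buckets[key], key=lambda x: [rank_map.index(card) for card in x]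
--         )
--     return buckets
-- ===== Notes on version B (the rewrite author's own statement) =====
-- stated objective: alternative
-- what changed: Each hand is classified from a single histogram of its non-joker cards (jokers either all join one existing count or form one fresh count, best type taken over those candidate count-multisets) instead of A's 13 full joker-replacement strings each re-counted and re-ranked by rank_hand; the category buckets and per-bucket sort are unchanged.
import Mathlib
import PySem

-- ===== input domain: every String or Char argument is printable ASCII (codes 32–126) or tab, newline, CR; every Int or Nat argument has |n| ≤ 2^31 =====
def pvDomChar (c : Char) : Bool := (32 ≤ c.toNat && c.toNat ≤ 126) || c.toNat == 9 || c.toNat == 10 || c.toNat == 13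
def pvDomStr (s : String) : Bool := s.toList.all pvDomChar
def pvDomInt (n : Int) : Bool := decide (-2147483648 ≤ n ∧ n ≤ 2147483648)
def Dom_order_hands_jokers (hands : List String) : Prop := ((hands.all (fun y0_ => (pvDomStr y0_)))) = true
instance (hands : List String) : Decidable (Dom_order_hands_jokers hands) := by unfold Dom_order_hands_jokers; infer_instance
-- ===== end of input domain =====

-- B classifies each hand from ONE histogram of its non-joker cards (jokers all join one
-- existing card or form one fresh group) instead of A's 13 joker-replacement strings each
-- re-ranked from scratch; buckets and the per-bucket sort are unchanged (objective: alternative).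

-- ===== PORT A =====
-- shared module constants (both Pythons define these identical lists)
def pvRankMap : List String := ["J", "2", "3", "4", "5", "6", "7", "8", "9", "T", "Q", "K", "A"]
def pvRankings : List String :=
  ["high_card", "one_pair", "two_pair", "three_of_a_kind", "full_house", "four_of_a_kind", "five_of_a_kind"]
-- sorted key: [rank_map.index(card) for card in x]; index? is none only for a card outside
-- rank_map (Python ValueError) — such hands are excluded by Pre_, the getD 0 is never used there
def pvSortKey (x : String) : List Int :=
  x.toList.map (fun ch => (((PySem.List.index? pvRankMap (String.ofList [ch])).getD 0 : Nat) : Int))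

-- rank_hand; hand.count(card) for a 1-char card is the char count
def rank_hand (hand : String) : String :=
  let hand_count : PySem.Dict Char Int :=
    PySem.Dict.mk ((PySem.Set.ofList hand.toList).map (fun card => (card, (hand.toList.count card : Int))))
  if (5 : Int) ∈ hand_count.values then "five_of_a_kind"
  else if (4 : Int) ∈ hand_count.values then "four_of_a_kind"
  else if (3 : Int) ∈ hand_count.values ∧ (2 : Int) ∈ hand_count.values then "full_house"
  else if (3 : Int) ∈ hand_count.values then "three_of_a_kind"
  else if hand_count.values.count 2 = 2 then "two_pair"
  else if (2 : Int) ∈ hand_count.values then "one_pair"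
  else "high_card"

-- hands_rankings.index(s); s is always one of the 7 ranking strings, so index? is never none
def pvIdx (s : String) : Nat := (PySem.List.index? pvRankings s).getD 0

def order_hands_jokers (hands : List String) : List (String × List String) :=
  let hands_dict : PySem.Dict String (List String) :=
    PySem.Dict.mk [("high_card", []), ("one_pair", []), ("two_pair", []), ("three_of_a_kind", []),
                   ("full_house", []), ("four_of_a_kind", []), ("five_of_a_kind", [])]
  let filled := hands.foldl (fun d hand =>
    let best_hand : String :=
      if PySem.Str.isIn "J" hand then
        pvRankMap.foldl (fun best card =>
          let hand_copy_type := rank_hand (PySem.Str.replace hand "J" card)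
          if pvIdx hand_copy_type > pvIdx best then hand_copy_type else best) "high_card"
      else rank_hand hand
    d.modify best_hand [] (fun l => l ++ [hand])) hands_dict
  filled.items.map (fun kv => (kv.1, PySem.List.sorted kv.2 pvSortKey false))

-- ===== PORT B =====
def typeOfCounts (counts : List Int) : Nat :=
  if (5 : Int) ∈ counts then 6
  else if (4 : Int) ∈ counts then 5
  else if (3 : Int) ∈ counts ∧ (2 : Int) ∈ counts then 4
  else if (3 : Int) ∈ counts then 3
  else if counts.count 2 = 2 then 2
  else if (2 : Int) ∈ counts then 1
  else 0

def classify (hand : String) : Nat :=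
  let jokers : Int := (PySem.Str.count hand "J" : Int)
  let hist : PySem.Dict Char Int :=
    hand.toList.foldl (fun d card => if card ≠ 'J' then d.modify card 0 (· + 1) else d) PySem.Dict.empty
  let counts := hist.values
  if jokers = 0 then typeOfCounts counts
  else
    let best := typeOfCounts (counts ++ [jokers])
    hist.keys.foldl (fun best tgt =>
      let t := typeOfCounts (hist.items.map (fun p => if p.1 = tgt then p.2 + jokers else p.2))
      if t > best then t else best) best

def order_hands_jokers_alt (hands : List String) : List (String × List String) :=
  let buckets : PySem.Dict String (List String) :=
    PySem.Dict.mk (pvRankings.map (fun name => (name, ([] : List String))))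
  -- categories[classify(hand)]: classify is always < 7, the getD default is never used
  let filled := hands.foldl (fun d hand =>
    d.modify (pvRankings.getD (classify hand) "") [] (fun l => l ++ [hand])) buckets
  filled.items.map (fun kv => (kv.1, PySem.List.sorted kv.2 pvSortKey false))

-- ===== PRECONDITION & SPEC =====
def pvCardChars : List Char := ['J', '2', '3', '4', '5', '6', '7', '8', '9', 'T', 'Q', 'K', 'A']
-- Pre_ excludes exactly the hands containing a character outside the 13 card symbols:
-- on those A raises ValueError (rank_map.index inside the sorted key), returning nothing.
def Pre_order_hands_jokers (hands : List String) : Prop :=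
  (hands.all (fun hand => hand.toList.all (fun c => c ∈ pvCardChars))) = true
instance (hands : List String) : Decidable (Pre_order_hands_jokers hands) := by
  unfold Pre_order_hands_jokers; infer_instance
def pvWitness_order_hands_jokers : List String := ["T55J5", "KK677"]
def Spec_order_hands_jokers (hands : List String) (out : List (String × List String)) : Prop :=
  out = order_hands_jokers_alt hands
instance (hands : List String) (out : List (String × List String)) :
    Decidable (Spec_order_hands_jokers hands out) := by unfold Spec_order_hands_jokers; infer_instance

-- ===== CLAIM (what is proved, stated in full; the proofs are below) =====
def Claim_equal_order_hands_jokers : Prop := ∀ (hands : List String), Dom_order_hands_jokers hands → Pre_order_hands_jokers hands → Spec_order_hands_jokers hands (order_hands_jokers hands)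

-- ===== LEMMAS AND PROOFS =====

theorem pv_count_go (c : Char) : ∀ (fuel : Nat) (l : List Char) (acc : Nat), l.length ≤ fuel →
    PySem.Chars.count.go [c] fuel l acc = acc + l.count c := by
  intro fuel
  induction fuel with
  | zero => intro l acc h; rw [List.length_eq_zero_iff.mp (Nat.le_zero.mp h)]; simp [PySem.Chars.count.go]
  | succ n ih =>
    intro l acc h
    cases l with
    | nil => simp [PySem.Chars.count.go]
    | cons x t =>
      by_cases hx : x = c
      · have hpre : List.isPrefixOf [c] (x :: t) = true := by simp [List.isPrefixOf, hx]
        simp only [PySem.Chars.count.go, hpre, if_pos]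
        rw [show List.drop (List.length [c]) (x :: t) = t by simp]
        rw [ih t (acc+1) (by simpa using Nat.lt_succ_iff.mp (by simpa using h))]
        simp [hx]; omega
      · have hpre : List.isPrefixOf [c] (x :: t) = false := by
          simp [List.isPrefixOf]; exact fun h' => hx (by simpa using h'.symm)
        simp only [PySem.Chars.count.go, hpre]
        rw [ih t acc (by simpa using Nat.lt_succ_iff.mp (by simpa using h))]
        simp [hx]

theorem pv_str_count_singleton (s : String) (c : Char) :
    PySem.Str.count s (String.ofList [c]) = s.toList.count c := by
  rw [PySem.Str.count_eq]
  have : (String.ofList [c]).toList = [c] := by simp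
  rw [this]
  simp only [PySem.Chars.count]
  rw [if_neg (by simp)]
  rw [pv_count_go c _ _ 0 le_rfl]; omega

theorem pv_replace_go (c : Char) : ∀ (fuel : Nat) (l acc : List Char), l.length ≤ fuel →
    PySem.Chars.replace.go ['J'] [c] fuel l acc
      = acc.reverse ++ l.map (fun y => if y = 'J' then c else y) := by
  intro fuel
  induction fuel with
  | zero => intro l acc h; rw [List.length_eq_zero_iff.mp (Nat.le_zero.mp h)]; simp [PySem.Chars.replace.go]
  | succ n ih =>
    intro l acc h
    cases l with
    | nil => simp [PySem.Chars.replace.go]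
    | cons x t =>
      by_cases hx : x = 'J'
      · have hpre : List.isPrefixOf ['J'] (x :: t) = true := by simp [List.isPrefixOf, hx]
        simp only [PySem.Chars.replace.go, hpre, if_pos]
        rw [show List.drop (List.length ['J']) (x :: t) = t by simp]
        rw [ih t _ (by simpa using Nat.lt_succ_iff.mp (by simpa using h))]
        simp [hx]
      · have hpre : List.isPrefixOf ['J'] (x :: t) = false := by
          simp [List.isPrefixOf]; exact fun h' => hx (by simpa using h'.symm)
        simp only [PySem.Chars.replace.go, hpre]
        rw [ih t _ (by simpa using Nat.lt_succ_iff.mp (by simpa using h))]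
        simp [hx]

theorem pv_replace_toList (s : String) (c : Char) :
    (PySem.Str.replace s "J" (String.ofList [c])).toList
      = s.toList.map (fun y => if y = 'J' then c else y) := by
  rw [PySem.Str.toList_replace]
  have h1 : ("J" : String).toList = ['J'] := rfl
  have h2 : (String.ofList [c]).toList = [c] := by simp
  rw [h1, h2]
  simp only [PySem.Chars.replace]
  rw [if_neg (by simp)]
  exact pv_replace_go c _ _ [] le_rfl

-- count in the J-substituted list
theorem pv_count_subst (cs : List Char) (c x : Char) (hc : c ≠ 'J') :
    (cs.map (fun y => if y = 'J' then c else y)).count x =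
      (if x = c then cs.count c + cs.count 'J' else if x = 'J' then 0 else cs.count x) := by
  induction cs with
  | nil => simp
  | cons h t ih =>
    simp only [List.map_cons, List.count_cons, ih]
    by_cases h1 : h = 'J' <;> by_cases h2 : x = c <;> by_cases h3 : x = 'J' <;>
      simp_all <;> split_ifs <;>
        first | omega | (exfalso; apply hc; tauto)

def pvValsOf (l : List Char) : List Int := (PySem.Set.ofList l).map (fun c => (l.count c : Int))



theorem pv_typeOf_perm {v w : List Int} (h : v.Perm w) : typeOfCounts v = typeOfCounts w := by
  unfold typeOfCounts
  simp only [h.mem_iff, h.count_eq]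

theorem pv_rank_hand_eq (hand : String) :
    rank_hand hand = pvRankings.getD (typeOfCounts (pvValsOf hand.toList)) "" := by
  unfold rank_hand typeOfCounts pvValsOf
  simp only [PySem.Dict.values_mk, List.map_map, Function.comp_def]
  split_ifs <;> rfl

theorem pv_singleton_infix {a : Char} {l : List Char} : [a] <:+: l ↔ a ∈ l := by
  constructor
  · intro h; exact h.subset (by simp)
  · intro h
    obtain ⟨s, t, rfl⟩ := List.append_of_mem h
    exact ⟨s, t, by simp⟩

theorem pv_idx_name {k : Nat} (hk : k ≤ 6) : pvIdx (pvRankings.getD k "") = k := by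
  interval_cases k <;> decide

theorem pv_typeOf_le (v : List Int) : typeOfCounts v ≤ 6 := by
  unfold typeOfCounts; split_ifs <;> omega

theorem pv_foldl_gt_max (l : List Char) (g : Char → Nat) (b : Nat) :
    l.foldl (fun best x => if g x > best then g x else best) b
      = l.foldl (fun acc x => max acc (g x)) b := by
  induction l generalizing b with
  | nil => rfl
  | cons x t ih =>
    simp only [List.foldl_cons]
    rw [show (if g x > b then g x else b) = max b (g x) by by_cases h : g x > b <;> simp [h] <;> omega, ih]

theorem pv_foldl_best (l : List Char) (g : Char → Nat) (hg : ∀ c, g c ≤ 6) :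
    ∀ b : Nat, b ≤ 6 →
    l.foldl (fun best c =>
        if pvIdx (pvRankings.getD (g c) "") > pvIdx best then pvRankings.getD (g c) "" else best)
      (pvRankings.getD b "")
      = pvRankings.getD (l.foldl (fun acc c => max acc (g c)) b) "" := by
  induction l with
  | nil => intro b _; rfl
  | cons c t ih =>
    intro b hb
    simp only [List.foldl_cons, pv_idx_name hb, pv_idx_name (hg c)]
    by_cases hgt : g c > b
    · rw [if_pos hgt, show max b (g c) = g c by omega, ih (g c) (hg c)]
    · rw [if_neg hgt, show max b (g c) = b by omega, ih b hb]

def pvNJ (cs : List Char) : List Char := cs.filter (fun x => decide (x ≠ 'J'))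
def pvD (cs : List Char) : PySem.Set Char := PySem.Set.ofList (pvNJ cs)
def pvCounts (cs : List Char) : List Int := (pvD cs).map (fun k => ((pvNJ cs).count k : Int))

theorem pv_mem_nj {x : Char} {cs : List Char} : x ∈ pvNJ cs ↔ x ∈ cs ∧ x ≠ 'J' := by
  simp [pvNJ]

theorem pv_nj_count (cs : List Char) (x : Char) (hx : x ≠ 'J') :
    (pvNJ cs).count x = cs.count x :=
  List.count_filter (by simp [hx])

theorem pv_mem_D {x : Char} {cs : List Char} : x ∈ pvD cs ↔ x ∈ cs ∧ x ≠ 'J' := by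
  rw [pvD, PySem.Set.mem_ofList]; exact pv_mem_nj

theorem pv_D_nodup (cs : List Char) : (pvD cs).Nodup := PySem.Set.nodup_ofList _

theorem pv_hist_eq (cs : List Char) :
    cs.foldl (fun d card => if card ≠ 'J' then d.modify card 0 (· + 1) else d) PySem.Dict.empty
      = PySem.Dict.counter (pvNJ cs) := by
  rw [PySem.List.foldl_ite_eq_foldl_filter (p := fun card => card ≠ 'J')
        (f := fun d card => PySem.Dict.modify d card 0 (· + 1))]
  rw [PySem.Dict.counter_eq_foldl]
  rfl

theorem pv_perm_setJ {cs : List Char} (hJ : 'J' ∈ cs) :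
    (PySem.Set.ofList cs).Perm (pvD cs ++ ['J']) := by
  rw [List.perm_ext_iff_of_nodup (PySem.Set.nodup_ofList cs)
        (by simp [List.nodup_append, pv_D_nodup cs, pv_mem_D])]
  intro a
  rw [PySem.Set.mem_ofList]
  by_cases ha : a = 'J' <;> simp [List.mem_append, pv_mem_D, ha, hJ]

theorem pv_valsOf_J {cs : List Char} (hJ : 'J' ∈ cs) :
    typeOfCounts (pvValsOf cs) = typeOfCounts (pvCounts cs ++ [(cs.count 'J' : Int)]) := by
  have h1 : (pvValsOf cs).Perm ((pvD cs ++ ['J']).map (fun c => (cs.count c : Int))) :=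
    (pv_perm_setJ hJ).map _
  rw [pv_typeOf_perm h1]
  have h2 : (pvD cs).map (fun c => (cs.count c : Int)) = pvCounts cs := by
    apply List.map_congr_left
    intro k hk
    rw [pv_nj_count cs k (pv_mem_D.mp hk).2]
  simp only [List.map_append, List.map_cons, List.map_nil, h2]

theorem pv_valsOf_subst {cs : List Char} {c : Char} (hc : c ≠ 'J') (hJ : 'J' ∈ cs) :
    typeOfCounts (pvValsOf (cs.map (fun y => if y = 'J' then c else y)))
      = if c ∈ pvD cs then
          typeOfCounts ((pvD cs).map (fun k =>
            if k = c then ((pvNJ cs).count k : Int) + (cs.count 'J' : Int) else ((pvNJ cs).count k : Int)))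
        else typeOfCounts (pvCounts cs ++ [(cs.count 'J' : Int)]) := by
  set rcs := cs.map (fun y => if y = 'J' then c else y) with hrcs
  have hcount : ∀ x, rcs.count x =
      (if x = c then cs.count c + cs.count 'J' else if x = 'J' then 0 else cs.count x) :=
    fun x => pv_count_subst cs c x hc
  have hmem : ∀ x, x ∈ rcs ↔ (x = c ∨ (x ∈ cs ∧ x ≠ 'J')) := by
    intro x
    rw [← List.count_pos_iff, hcount x]
    constructor
    · intro h
      split_ifs at h with h1 h2
      · left; exact h1
      · omega
      · right; exact ⟨List.count_pos_iff.mp h, h2⟩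
    · intro h
      rcases h with rfl | ⟨hx, hxJ⟩
      · rw [if_pos rfl]
        have := List.count_pos_iff.mpr hJ
        omega
      · by_cases hxc : x = c
        · rw [if_pos hxc]
          have := List.count_pos_iff.mpr hJ
          omega
        · rw [if_neg hxc, if_neg hxJ]
          exact List.count_pos_iff.mpr hx
  by_cases hcD : c ∈ pvD cs
  · rw [if_pos hcD]
    have hperm : (PySem.Set.ofList rcs).Perm (pvD cs) := by
      rw [List.perm_ext_iff_of_nodup (PySem.Set.nodup_ofList rcs) (pv_D_nodup cs)]
      intro a
      rw [PySem.Set.mem_ofList, hmem a, pv_mem_D]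
      constructor
      · rintro (rfl | h)
        · exact pv_mem_D.mp hcD
        · exact h
      · intro h; right; exact h
    have h1 : (pvValsOf rcs).Perm ((pvD cs).map (fun x => (rcs.count x : Int))) := hperm.map _
    rw [pv_typeOf_perm h1]
    congr 1
    apply List.map_congr_left
    intro k hk
    rw [hcount k]
    by_cases hkc : k = c
    · subst hkc
      rw [if_pos rfl, if_pos rfl, pv_nj_count cs k hc]
      push_cast; ring
    · rw [if_neg hkc, if_neg hkc, if_neg (pv_mem_D.mp hk).2, pv_nj_count cs k (pv_mem_D.mp hk).2]
  · rw [if_neg hcD]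
    have hcnotin : c ∉ cs := fun h => hcD (pv_mem_D.mpr ⟨h, hc⟩)
    have hperm : (PySem.Set.ofList rcs).Perm (pvD cs ++ [c]) := by
      rw [List.perm_ext_iff_of_nodup (PySem.Set.nodup_ofList rcs)
            (by simp [List.nodup_append, pv_D_nodup cs]; exact fun a ha hac => hcD (hac ▸ ha))]
      intro a
      rw [PySem.Set.mem_ofList, hmem a, List.mem_append, pv_mem_D]
      simp only [List.mem_singleton]
      tauto
    have h1 : (pvValsOf rcs).Perm ((pvD cs ++ [c]).map (fun x => (rcs.count x : Int))) := hperm.map _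
    rw [pv_typeOf_perm h1]
    congr 1
    rw [List.map_append]
    congr 1
    · apply List.map_congr_left
      intro k hk
      rw [hcount k]
      have hkc : k ≠ c := fun h => hcnotin (h ▸ (pv_mem_D.mp hk).1)
      rw [if_neg hkc, if_neg (pv_mem_D.mp hk).2, pv_nj_count cs k (pv_mem_D.mp hk).2]
    · simp only [List.map_cons, List.map_nil, List.cons.injEq, and_true]
      rw [hcount c, if_pos rfl]
      have : cs.count c = 0 := by
        rw [List.count_eq_zero]; exact hcnotin
      rw [this]
      push_cast; ring

def pvG (cs : List Char) (c : Char) : Nat :=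
  typeOfCounts (pvValsOf (cs.map (fun y => if y = 'J' then c else y)))
def pvFresh (cs : List Char) : Nat := typeOfCounts (pvCounts cs ++ [(cs.count 'J' : Int)])
def pvBT (cs : List Char) (tgt : Char) : Nat :=
  typeOfCounts ((pvD cs).map (fun k =>
    if k = tgt then ((pvNJ cs).count k : Int) + (cs.count 'J' : Int) else ((pvNJ cs).count k : Int)))

theorem pv_G_J {cs : List Char} (hJ : 'J' ∈ cs) : pvG cs 'J' = pvFresh cs := by
  unfold pvG pvFresh
  rw [show cs.map (fun y => if y = 'J' then 'J' else y) = cs from by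
        conv_rhs => rw [← List.map_id cs]
        exact List.map_congr_left (fun a _ => by by_cases h : a = 'J' <;> simp [h])]
  exact pv_valsOf_J hJ

theorem pv_G_ne {cs : List Char} {c : Char} (hc : c ≠ 'J') (hJ : 'J' ∈ cs) :
    pvG cs c = if c ∈ pvD cs then pvBT cs c else pvFresh cs := pv_valsOf_subst hc hJ

theorem pv_glue (xs ys : List Nat) (a : Nat)
    (h1 : ∀ x ∈ xs, x = a ∨ x ∈ ys) (h2 : ∀ y ∈ ys, y ∈ xs) (ha : a ∈ xs) :
    xs.foldl max 0 = ys.foldl max a := by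
  apply Nat.le_antisymm
  · rcases PySem.List.foldl_max_mem xs 0 with h | h
    · rw [h]; exact Nat.zero_le _
    · rcases h1 _ h with he | he
      · rw [he]; exact (PySem.List.le_foldl_max ys a).1
      · exact (PySem.List.le_foldl_max ys a).2 _ he
  · rcases PySem.List.foldl_max_mem ys a with h | h
    · rw [h]; exact (PySem.List.le_foldl_max xs 0).2 _ ha
    · exact (PySem.List.le_foldl_max xs 0).2 _ (h2 _ h)

theorem pv_max_eq {cs : List Char} (hJ : 'J' ∈ cs) (hchars : ∀ c ∈ cs, c ∈ pvCardChars) :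
    pvCardChars.foldl (fun acc c => max acc (pvG cs c)) 0
      = (pvD cs).foldl (fun acc k => max acc (pvBT cs k)) (pvFresh cs) := by
  have hMl : pvCardChars.foldl (fun acc c => max acc (pvG cs c)) 0
      = (pvCardChars.map (pvG cs)).foldl max 0 :=
    (List.foldl_map (f := pvG cs) (g := fun a b => max a b) (l := pvCardChars) (init := 0)).symm
  have hMr : (pvD cs).foldl (fun acc k => max acc (pvBT cs k)) (pvFresh cs)
      = ((pvD cs).map (pvBT cs)).foldl max (pvFresh cs) :=
    (List.foldl_map (f := pvBT cs) (g := fun a b => max a b) (l := pvD cs) (init := pvFresh cs)).symm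
  rw [hMl, hMr]
  apply pv_glue
  · intro x hx
    obtain ⟨c, hcmem, rfl⟩ := List.mem_map.mp hx
    by_cases hc : c = 'J'
    · subst hc; left; exact pv_G_J hJ
    · rw [pv_G_ne hc hJ]
      by_cases hcD : c ∈ pvD cs
      · right; rw [if_pos hcD]; exact List.mem_map.mpr ⟨c, hcD, rfl⟩
      · left; rw [if_neg hcD]
  · intro y hy
    obtain ⟨k, hkmem, rfl⟩ := List.mem_map.mp hy
    have hk := pv_mem_D.mp hkmem
    have hbg : pvBT cs k = pvG cs k := by rw [pv_G_ne hk.2 hJ, if_pos hkmem]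
    rw [hbg]
    exact List.mem_map.mpr ⟨k, hchars k hk.1, rfl⟩
  · rw [← pv_G_J hJ]
    exact List.mem_map.mpr ⟨'J', by decide, rfl⟩

theorem pv_count_J (hand : String) : PySem.Str.count hand "J" = hand.toList.count 'J' := by
  rw [show ("J" : String) = String.ofList ['J'] from rfl]
  exact pv_str_count_singleton hand 'J'

theorem pv_isin_J (hand : String) : PySem.Str.isIn "J" hand = decide ('J' ∈ hand.toList) := by
  have hb : ("J" : String).toList = ['J'] := rfl
  rcases Bool.eq_false_or_eq_true (PySem.Str.isIn "J" hand) with h | h <;> rw [h]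
  · symm; rw [decide_eq_true_eq]
    have h2 := (PySem.Str.isIn_iff_infix "J" hand).mp h
    rw [hb] at h2
    exact pv_singleton_infix.mp h2
  · symm; rw [decide_eq_false_iff_not]
    intro hmem
    have h2 := (PySem.Str.isIn_iff_infix "J" hand).mpr (by rw [hb]; exact pv_singleton_infix.mpr hmem)
    rw [h] at h2; cases h2

theorem pv_classify_eq (hand : String) :
    classify hand =
      if 'J' ∈ hand.toList then
        (pvD hand.toList).foldl (fun acc k => max acc (pvBT hand.toList k)) (pvFresh hand.toList)
      else typeOfCounts (pvCounts hand.toList) := by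
  unfold classify
  rw [pv_count_J, pv_hist_eq]
  simp only [PySem.Dict.values, PySem.Dict.keys, PySem.Dict.items_counter, List.map_map,
    Function.comp_def]
  by_cases hJ : 'J' ∈ hand.toList
  · rw [if_pos hJ, if_neg (by simpa [List.count_eq_zero] using hJ)]
    rw [pv_foldl_gt_max]
    simp only [List.map_id']
    rfl
  · rw [if_neg hJ, if_pos (by simpa [List.count_eq_zero] using hJ)]
    rfl

theorem pv_A_best_eq (hand : String) (hchars : ∀ c ∈ hand.toList, c ∈ pvCardChars) :
    (if PySem.Str.isIn "J" hand then
        pvRankMap.foldl (fun best card =>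
          if pvIdx (rank_hand (PySem.Str.replace hand "J" card)) > pvIdx best
          then rank_hand (PySem.Str.replace hand "J" card) else best) "high_card"
      else rank_hand hand)
      = pvRankings.getD (classify hand) "" := by
  rw [pv_isin_J, pv_classify_eq]
  by_cases hJ : 'J' ∈ hand.toList
  · rw [if_pos ((decide_eq_true_eq).mpr hJ), if_pos hJ]
    rw [show pvRankMap = pvCardChars.map (fun c => String.ofList [c]) from rfl]
    rw [List.foldl_map]
    have hbody : ∀ (best : String) (c : Char), c ∈ pvCardChars →
        (if pvIdx (rank_hand (PySem.Str.replace hand "J" (String.ofList [c]))) > pvIdx best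
         then rank_hand (PySem.Str.replace hand "J" (String.ofList [c])) else best)
        = (if pvIdx (pvRankings.getD (pvG hand.toList c) "") > pvIdx best
           then pvRankings.getD (pvG hand.toList c) "" else best) := by
      intro best c _
      rw [pv_rank_hand_eq, pv_replace_toList]
      rfl
    rw [PySem.List.foldl_congr_mem pvCardChars _ _ "high_card" hbody]
    rw [show ("high_card" : String) = pvRankings.getD 0 "" from rfl]
    rw [pv_foldl_best pvCardChars (pvG hand.toList) (fun c => pv_typeOf_le _) 0 (by omega)]
    rw [pv_max_eq hJ hchars]
  · rw [if_neg (by simpa using hJ), if_neg hJ]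
    rw [pv_rank_hand_eq]
    congr 2
    unfold pvValsOf pvCounts pvD
    rw [show pvNJ hand.toList = hand.toList from
      List.filter_eq_self.mpr (fun a ha => by
        simp only [ne_eq, decide_not, Bool.not_eq_eq_eq_not, Bool.not_true, decide_eq_false_iff_not]
        exact fun h => hJ (h ▸ ha))]


theorem pv_main : ∀ (hands : List String), Pre_order_hands_jokers hands →
    order_hands_jokers hands = order_hands_jokers_alt hands := by
  intro hands hpre
  unfold order_hands_jokers order_hands_jokers_alt
  dsimp only
  congr 2
  apply PySem.List.foldl_congr_mem
  intro d hand hmem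
  rw [pv_A_best_eq hand (fun c hc =>
    of_decide_eq_true (List.all_eq_true.mp (List.all_eq_true.mp hpre hand hmem) c hc))]


-- ===== VERDICT (by name: the statement is the Claim_ definition above) =====
theorem order_hands_jokers_spec : Claim_equal_order_hands_jokers := by
  intro hands _ hpre
  exact pv_main hands hpre
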